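-- pv_equiv track=rewrite | github.com/ashahid6760/PySpark-TFIDF | TF-IDF.py | delimitter_split
-- ===== SOURCE A (Python) =====
-- def delimitter_split(line):
--     arr = line[0].split(',')
--     result = []
--     for value in arr:
--         words = value.split(" ")
--         for i in range(len(words)):
--             result.append([words[i],line[1]])
--     return result
-- ===== SOURCE B (Python) =====
-- def delimitter_split(line):
--     # Single character-by-character scan with an explicit token accumulator:
--     # no split calls at all; a delimiter (',' or ' ') flushes the current token.
--     tag = line[1]
--     result = []
--     cur = []
--     for ch in line[0]:
--         if ch == ',' or ch == ' ':
--             result.append([''.join(cur), tag])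
--             cur = []
--         else:
--             cur.append(ch)
--     result.append([''.join(cur), tag])
--     return result
-- ===== Notes on version B (the rewrite author's own statement) =====
-- stated objective: alternative
-- what changed: B drops all split calls and instead tokenizes with a single character-by-character scan that maintains an explicit current-token accumulator, flushing it on every ',' or ' '; A builds intermediate piece/word lists via two staged splits and an index loop.
import Mathlib
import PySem

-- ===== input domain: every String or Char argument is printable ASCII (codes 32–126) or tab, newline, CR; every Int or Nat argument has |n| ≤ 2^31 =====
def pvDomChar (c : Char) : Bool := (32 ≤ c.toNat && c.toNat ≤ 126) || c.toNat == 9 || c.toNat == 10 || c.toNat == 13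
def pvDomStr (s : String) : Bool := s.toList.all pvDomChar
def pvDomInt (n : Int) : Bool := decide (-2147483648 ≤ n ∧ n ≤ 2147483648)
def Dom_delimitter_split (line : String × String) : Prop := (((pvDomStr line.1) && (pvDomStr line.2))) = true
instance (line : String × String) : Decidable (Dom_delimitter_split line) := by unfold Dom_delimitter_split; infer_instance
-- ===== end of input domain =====

-- B tokenizes in one character-by-character scan with an explicit current-token accumulator (no split calls), an alternative decomposition of A's staged comma-then-space splits.

-- ===== PORT A =====
-- A: split on ',', then for each piece split on ' ' and append [words[i], line[1]] for each index i.
def delimitter_split (line : String × String) : List (List String) :=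
  let arr : List String := (PySem.Chars.splitOn line.1.toList [',']).map String.ofList
  arr.foldl (fun result value =>
    let words : List String := (PySem.Chars.splitOn value.toList [' ']).map String.ofList
    (PySem.List.pyRange 0 (PySem.List.len words)).foldl
      (fun r i => r ++ [[PySem.List.pyGetD words i "", line.2]]) result) []

-- ===== PORT B =====
-- B: one pass over the characters, state = (result so far, current token chars);
-- ',' or ' ' flushes the current token, anything else is appended to it; one final flush.
def delimitter_split_alt (line : String × String) : List (List String) :=
  let tag := line.2
  let st := line.1.toList.foldl
    (fun (st : List (List String) × List Char) ch =>
      if ch = ',' ∨ ch = ' ' then (st.1 ++ [[String.ofList st.2, tag]], [])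
      else (st.1, st.2 ++ [ch])) ([], [])
  st.1 ++ [[String.ofList st.2, tag]]

-- ===== PRECONDITION & SPEC =====
def Spec_delimitter_split (line : String × String) (out : List (List String)) : Prop := out = delimitter_split_alt line
instance (line : String × String) (out : List (List String)) : Decidable (Spec_delimitter_split line out) := by unfold Spec_delimitter_split; infer_instance

-- ===== CLAIM (what is proved, stated in full; the proofs are below) =====
def Claim_equal_delimitter_split : Prop := ∀ (line : String × String), Dom_delimitter_split line → Spec_delimitter_split line (delimitter_split line)

-- ===== LEMMAS AND PROOFS =====

-- Reference single-character splitter (Python str.split(c) for a one-char separator).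
def split1 (c : Char) : List Char → List (List Char)
  | [] => [[]]
  | a :: t => if a = c then [] :: split1 c t else (split1 c t).modifyHead (a :: ·)

-- Two-delimiter splitter: the token structure B's scan produces.
def split2 : List Char → List (List Char)
  | [] => [[]]
  | a :: t => if a = ',' ∨ a = ' ' then [] :: split2 t else (split2 t).modifyHead (a :: ·)

theorem split1_ne_nil (c : Char) (s : List Char) : split1 c s ≠ [] := by
  induction s with
  | nil => simp [split1]
  | cons a t ih =>
    simp only [split1]; split
    · simp
    · cases h : split1 c t with
      | nil => exact absurd h ih
      | cons p ps => simp [List.modifyHead]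

theorem split2_ne_nil (s : List Char) : split2 s ≠ [] := by
  induction s with
  | nil => simp [split2]
  | cons a t ih =>
    simp only [split2]; split
    · simp
    · cases h : split2 t with
      | nil => exact absurd h ih
      | cons p ps => simp [List.modifyHead]

theorem splitOn_go_single (c : Char) :
    ∀ (fuel : Nat) (l cur : List Char) (acc : List (List Char)), l.length < fuel →
      PySem.Chars.splitOn.go [c] fuel l cur acc
        = acc.reverse ++ (split1 c l).modifyHead (cur.reverse ++ ·) := by
  intro fuel
  induction fuel with
  | zero => intro l cur acc h; omega
  | succ f ih =>
    intro l cur acc h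
    cases l with
    | nil => simp [PySem.Chars.splitOn.go, split1]
    | cons a rest =>
      rw [PySem.Chars.splitOn.go]
      by_cases hac : a = c
      · subst hac
        simp only [List.isPrefixOf, BEq.rfl, Bool.true_and, if_pos]
        rw [ih _ _ _ (by simpa using Nat.lt_of_succ_lt_succ h)]
        cases hs : split1 a rest with
        | nil => exact absurd hs (split1_ne_nil a rest)
        | cons p ps => simp [split1, hs, List.modifyHead]
      · have : ([c].isPrefixOf (a :: rest)) = false := by
          simp [List.isPrefixOf]; exact fun h' => absurd h'.symm hac
        rw [if_neg (by simp [this])]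
        rw [ih _ _ _ (by simpa using Nat.lt_of_succ_lt_succ h)]
        simp only [split1, if_neg hac, List.reverse_cons]
        cases hs : split1 c rest with
        | nil => exact absurd hs (split1_ne_nil c rest)
        | cons p ps => simp [List.modifyHead]

theorem splitOn_single (c : Char) (s : List Char) :
    PySem.Chars.splitOn s [c] = split1 c s := by
  rw [PySem.Chars.splitOn, splitOn_go_single c _ _ _ _ (by omega)]
  cases hs : split1 c s with
  | nil => exact absurd hs (split1_ne_nil c s)
  | cons p ps => simp [List.modifyHead]

-- Splitting on both delimiters at once = split on ',' then each piece on ' '.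
theorem split2_eq_flatMap (s : List Char) :
    split2 s = (split1 ',' s).flatMap (split1 ' ') := by
  induction s with
  | nil => simp [split2, split1]
  | cons a t ih =>
    by_cases hc : a = ','
    · subst hc
      simp [split2, split1, ih]
    · cases hs : split1 ',' t with
      | nil => exact absurd hs (split1_ne_nil _ t)
      | cons p ps =>
        rw [hs] at ih
        simp only [List.flatMap_cons] at ih
        by_cases hsp : a = ' '
        · subst hsp
          simp [split2, split1, hs, List.modifyHead, ih]
        · have hd : ¬(a = ',' ∨ a = ' ') := by tauto
          simp only [split2, if_neg hd, ih, split1, hs, List.modifyHead]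
          cases hq : split1 ' ' p with
          | nil => exact absurd hq (split1_ne_nil _ p)
          | cons q qs => simp [hc, hq, split1, if_neg hsp, List.modifyHead]

-- B's scan, from an arbitrary state, produces the split2 tokens paired with the tag.
theorem scan_eq (tag : String) :
    ∀ (s : List Char) (res : List (List String)) (cur : List Char),
      (let st := s.foldl
        (fun (st : List (List String) × List Char) ch =>
          if ch = ',' ∨ ch = ' ' then (st.1 ++ [[String.ofList st.2, tag]], [])
          else (st.1, st.2 ++ [ch])) (res, cur);
       st.1 ++ [[String.ofList st.2, tag]])
        = res ++ ((split2 s).modifyHead (cur ++ ·)).map (fun t => [String.ofList t, tag]) := by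
  intro s
  induction s with
  | nil => intro res cur; simp [split2, List.modifyHead]
  | cons a t ih =>
    intro res cur
    by_cases hd : a = ',' ∨ a = ' '
    · simp only [List.foldl_cons, if_pos hd]
      rw [ih (res ++ [[String.ofList cur, tag]]) []]
      cases hs : split2 t with
      | nil => exact absurd hs (split2_ne_nil t)
      | cons p ps => simp [split2, if_pos hd, hs, List.modifyHead]
    · simp only [List.foldl_cons, if_neg hd]
      rw [ih res (cur ++ [a])]
      cases hs : split2 t with
      | nil => exact absurd hs (split2_ne_nil t)
      | cons p ps => simp [split2, if_neg hd, hs, List.modifyHead]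

-- ===== VERDICT (by name: the statement is the Claim_ definition above) =====
theorem delimitter_split_spec : Claim_equal_delimitter_split := by
  intro line _
  unfold Spec_delimitter_split delimitter_split delimitter_split_alt
  simp only [splitOn_single]
  -- A's inner indexed loop = a map over words; outer loop = flatMap
  have inner : ∀ (words : List String) (init : List (List String)),
      (PySem.List.pyRange 0 (PySem.List.len words)).foldl
        (fun r i => r ++ [[PySem.List.pyGetD words i "", line.2]]) init
        = init ++ words.map (fun w => [w, line.2]) := by
    intro words init
    rw [PySem.List.foldl_pyRange_pyGetD words "" (fun r w => r ++ [[w, line.2]]) init (by omega)]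
    have flt : ∀ (ws : List String),
        (ws.map (fun w => [[w, line.2]])).flatten = ws.map (fun w => [w, line.2]) := by
      intro ws; induction ws with
      | nil => rfl
      | cons w ws ihw => simp [ihw]
    simp [flt]
  simp only [inner]
  rw [PySem.List.foldl_append_eq_flatMap]
  rw [scan_eq]
  have hmh : ∀ (l : List (List Char)), l.modifyHead (fun x => [] ++ x) = l := by
    intro l; cases l <;> simp [List.modifyHead]
  rw [hmh, split2_eq_flatMap]
  simp [List.flatMap_map, List.map_flatMap, String.toList_ofList, Function.comp_def]
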